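-- pv_equiv track=rewrite | github.com/roxxie09/rxxiestrms.live | MLBSCRIPT/nhl.py | extract_nhl_section2_lines
-- ===== SOURCE A (Python) =====
-- def extract_nhl_section2_lines(m3u_content: str) -> list[str]:
--     """
--     Extract lines belonging to 'section 2 of nhl':
--     starting at the marker line that contains
--     '#EXTINF:-1,--- NEXT SECTION ---2' up to but not including
--     the next '--- NEXT SECTION ---' marker (or end of file).
--     """
--     lines = m3u_content.splitlines()
--     section_lines = []
--     in_section = False
--
--     for line in lines:
--         stripped = line.strip()
--         if not in_section:
--             if stripped.startswith("#EXTINF") and "NEXT SECTION ---2" in stripped: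
--                 in_section = True
--                 section_lines.append(stripped)
--         else:
--             if stripped.startswith("#EXTINF") and "NEXT SECTION ---" in stripped and "NEXT SECTION ---2" not in stripped:
--                 # reached the next section marker
--                 break
--             section_lines.append(stripped)
--
--     return section_lines
-- ===== SOURCE B (Python) =====
-- def extract_nhl_section2_lines(m3u_content: str) -> list[str]:
--     """Find-then-scan decomposition: strip every line once, drop lines up to
--     the section-2 start marker, then collect until the next section marker."""
--     stripped = [line.strip() for line in m3u_content.splitlines()]
--
--     def is_start(s):
--         return s.startswith("#EXTINF") and "NEXT SECTION ---2" in s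
--
--     def is_end(s):
--         return (s.startswith("#EXTINF") and "NEXT SECTION ---" in s
--                 and "NEXT SECTION ---2" not in s)
--
--     rest = stripped
--     while rest and not is_start(rest[0]):
--         rest = rest[1:]
--     if not rest:
--         return []
--     out = [rest[0]]
--     for s in rest[1:]:
--         if is_end(s):
--             break
--         out.append(s)
--     return out
-- ===== Notes on version B (the rewrite author's own statement) =====
-- stated objective: simpler
-- what changed: Replaces the in_section state flag with an explicit find-then-scan decomposition: strip all lines once, drop lines until the start marker (dropWhile), then take lines until the next section marker (takeWhile).
import Mathlib
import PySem

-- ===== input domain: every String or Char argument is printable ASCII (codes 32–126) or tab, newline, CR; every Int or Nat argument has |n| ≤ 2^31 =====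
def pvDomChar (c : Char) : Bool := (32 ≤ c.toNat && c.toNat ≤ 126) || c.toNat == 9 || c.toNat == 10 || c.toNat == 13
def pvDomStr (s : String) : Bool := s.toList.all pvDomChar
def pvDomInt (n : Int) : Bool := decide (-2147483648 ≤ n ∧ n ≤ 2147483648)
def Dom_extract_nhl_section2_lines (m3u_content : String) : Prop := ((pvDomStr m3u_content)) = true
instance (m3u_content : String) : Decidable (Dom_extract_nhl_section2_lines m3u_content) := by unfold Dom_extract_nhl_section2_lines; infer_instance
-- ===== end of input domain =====

-- B replaces A's in_section flag with a find-then-scan decomposition (dropWhile to the start marker, takeWhile to the next marker); objective: simpler.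


-- The two marker tests both programs share (A writes them inline, B names them):
-- start-of-section-2 marker and next-section marker.
def nhlIsStart (s : String) : Bool :=
  PySem.Str.startswith s "#EXTINF" && PySem.Str.isIn "NEXT SECTION ---2" s

def nhlIsEnd (s : String) : Bool :=
  PySem.Str.startswith s "#EXTINF" && PySem.Str.isIn "NEXT SECTION ---" s
    && !(PySem.Str.isIn "NEXT SECTION ---2" s)

-- ===== PORT A =====
-- A's for-loop with the in_section flag and break, as structural recursion over the
-- remaining lines with state (section_lines accumulator, in_section flag).
def nhlLoopA : List String → List String → Bool → List String
  | [], section_lines, _ => section_lines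
  | line :: rest, section_lines, in_section =>
    let stripped := PySem.Str.strip line
    if !in_section then
      if nhlIsStart stripped then
        nhlLoopA rest (section_lines ++ [stripped]) true
      else
        nhlLoopA rest section_lines in_section
    else
      if nhlIsEnd stripped then
        section_lines  -- break
      else
        nhlLoopA rest (section_lines ++ [stripped]) in_section

def extract_nhl_section2_lines (m3u_content : String) : List String :=
  nhlLoopA (PySem.Str.splitlines m3u_content) [] false

-- ===== PORT B =====
def extract_nhl_section2_lines_alt (m3u_content : String) : List String :=
  let stripped := (PySem.Str.splitlines m3u_content).map PySem.Str.strip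
  -- the while-loop 'rest = rest[1:] until is_start(rest[0])' is dropWhile
  match stripped.dropWhile (fun s => !nhlIsStart s) with
  | [] => []
  -- the for-loop with break at is_end is takeWhile
  | x :: xs => x :: xs.takeWhile (fun s => !nhlIsEnd s)

-- ===== PRECONDITION & SPEC =====
def Spec_extract_nhl_section2_lines (m3u_content : String) (out : List String) : Prop := out = extract_nhl_section2_lines_alt m3u_content
instance (m3u_content : String) (out : List String) : Decidable (Spec_extract_nhl_section2_lines m3u_content out) := by unfold Spec_extract_nhl_section2_lines; infer_instance

-- ===== CLAIM (what is proved, stated in full; the proofs are below) =====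
def Claim_equal_extract_nhl_section2_lines : Prop := ∀ (m3u_content : String), Dom_extract_nhl_section2_lines m3u_content → Spec_extract_nhl_section2_lines m3u_content (extract_nhl_section2_lines m3u_content)

-- ===== LEMMAS AND PROOFS =====

-- A's loop in phase in_section = true appends exactly the takeWhile of the stripped lines.
theorem nhlLoopA_true (ls acc : List String) :
    nhlLoopA ls acc true = acc ++ (ls.map PySem.Str.strip).takeWhile (fun s => !nhlIsEnd s) := by
  induction ls generalizing acc with
  | nil => simp only [nhlLoopA, List.map_nil, List.takeWhile_nil, List.append_nil]
  | cons l ls ih =>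
    simp only [nhlLoopA, List.map_cons, List.takeWhile_cons, Bool.not_true, Bool.not_eq_eq_eq_not]
    by_cases h : nhlIsEnd (PySem.Str.strip l) = true
    · simp [h]
    · simp only [Bool.not_eq_true] at h
      simp [h, ih]

-- A's loop in phase in_section = false equals B's dropWhile-then-takeWhile scan.
theorem nhlLoopA_false (ls acc : List String) :
    nhlLoopA ls acc false = acc ++
      (match (ls.map PySem.Str.strip).dropWhile (fun s => !nhlIsStart s) with
       | [] => []
       | x :: xs => x :: xs.takeWhile (fun s => !nhlIsEnd s)) := by
  induction ls generalizing acc with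
  | nil => simp only [nhlLoopA, List.map_nil, List.dropWhile_nil, List.append_nil]
  | cons l ls ih =>
    simp only [nhlLoopA, List.map_cons, List.dropWhile_cons]
    by_cases h : nhlIsStart (PySem.Str.strip l) = true
    · simp [h, nhlLoopA_true]
    · simp only [Bool.not_eq_true] at h
      simp [h, ih]

-- ===== VERDICT (by name: the statement is the Claim_ definition above) =====
theorem extract_nhl_section2_lines_spec : Claim_equal_extract_nhl_section2_lines := by
  intro m _
  show extract_nhl_section2_lines m = extract_nhl_section2_lines_alt m
  simp only [extract_nhl_section2_lines, extract_nhl_section2_lines_alt, nhlLoopA_false,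
    List.nil_append]
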